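/-
  TESTS of the stepper on decode facts, on a function's code, and on a straight-line SEQUENCE of twelve instructions:
  the state after each step is a nest of setters over the SAME base state `u`, so the facts about `u` serve every step,
  and the nest stays in normal form (`u_norm`: registers in register order, memory, flags ONE layer deep, RIP).
-/
import UserX.StepAt
import UserX.InsnTerm
import UserX.DecodeImage
namespace X86.User.StepSeqTest
open X86 X86.Sem X86.User

set_option linter.unusedSimpArgs false
set_option linter.unusedVariables false

#udecode add_rax_rbx "48 01 d8"
#udecode call_rel32 "e8 73 bc 00 00"
#udecode ret "c3"
#udecode jle_rel8 "7e 10"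

variable {L : Layout} {μ : Microarch} {u : State}

/-! ### One `User.Step` from a decode fact -/

/-- `add rax, rbx`: the sum in RAX, the flags of the addition, RIP after the three bytes. -/
example (Q : State → Prop) (rax rbx : Word) (hc : CodeAt u.mem u.rip [0x48, 0x01, 0xd8]) (hr : L.Has u.rip 3)
    (h_rax : u.reg .rax = rax) (h_rbx : u.reg .rbx = rbx) (h_rip : u.rip = 0x100000)
    (hQ : Q (((u.setReg .rax (rax + rbx)).setFlags
      (u.flags.setStatus (Alu.add rax.toBitVec rbx.toBitVec).flags)).setRip 0x100003)) :
    Step L μ u Q := by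
  u_step_at add_rax_rbx hc hr [h_rax, h_rbx, h_rip]
  exact hQ

/-- `call rel32`: the return address is stored below RSP, RSP moves, RIP is the target. The side condition
`L.Has (rsp - 8) 8` is found among the hypotheses. -/
example (Q : State → Prop) (rsp : Word) (hc : CodeAt u.mem u.rip [0xe8, 0x73, 0xbc, 0x00, 0x00]) (hr : L.Has u.rip 5)
    (h_rsp : u.reg .rsp = rsp) (h_rip : u.rip = 0x100000) (hμ : μ.vendor = .intel)
    (hstack : L.Has (rsp - 8) 8)
    (hQ : Q (((u.setReg .rsp (rsp - 8)).setMem (u.mem.writeLE (rsp - 8) 8 0x100005)).setRip 0x10bc78)) :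
    Step L μ u Q := by
  u_step_at call_rel32 hc hr [h_rsp, h_rip, hμ]
  exact hQ

/-- `ret`: the return address is loaded from RSP and must be a user address; RSP moves. -/
example (Q : State → Prop) (rsp ra : Word) (hc : CodeAt u.mem u.rip [0xc3]) (hr : L.Has u.rip 1)
    (h_rsp : u.reg .rsp = rsp) (h_rip : u.rip = 0x100000) (hμ : μ.vendor = .intel)
    (hstack : L.Has rsp 8) (h_ra : u.mem.readLE rsp 8 = ra.toNat) (hcan : ra < 0x40000000)
    (hQ : Q ((u.setReg .rsp (rsp + 8)).setRip ra)) :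
    Step L μ u Q := by
  u_step_at ret hc hr [h_rsp, h_rip, hμ, h_ra, UserX.ofNat_toNat]
  · exact hcan
  · exact hQ

/-- `jle rel8` after `cmp eax, 5`: two goals, each with the condition as a hypothesis; `cond_simp` turns the condition
into the signed comparison of the operands. -/
example (Q : State → Prop) (rax : Word) (f0 : Flags) (hc : CodeAt u.mem u.rip [0x7e, 0x10]) (hr : L.Has u.rip 2)
    (h_rip : u.rip = 0x100000) (hμ : μ.vendor = .intel)
    (h_fl : u.flags = f0.setStatus (Alu.sub (Word.part .w32 rax) 5#32).flags)
    (hTaken : (Word.part .w32 rax).sle 5#32 = true → Q (u.setRip 0x100012))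
    (hNot : (Word.part .w32 rax).sle 5#32 = false → Q (u.setRip 0x100002)) :
    Step L μ u Q := by
  u_step_at jle_rel8 hc hr [h_rip, hμ, h_fl]
  · simp only [cond_simp] at hc1
    exact hTaken hc1
  · simp only [cond_simp, Bool.not_eq_true] at hc1
    exact hNot hc1

/-- Facts about the start state may be stated on typed PARTS (`u.part .w32 .rax = v`) and on loads (`u.mem.readLE a k = n`);
`u_body_ctx` collects every such hypothesis of the context. `add eax, [rsp+4]` with EAX and the slot known. -/
example (Q : State → Prop) (rsp : Word) (v w : BitVec 32) (f0 : Flags)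
    (h_eax : u.part .w32 .rax = v) (h_rsp : u.reg .rsp = rsp) (h_rip : u.rip = 0x100000) (h_fl : u.flags = f0)
    (h_slot : u.mem.readLE (rsp + 4) 4 = w.toNat) (hstack : L.Has (rsp + 4) 4)
    (hQ : Q (((u.setReg .rax (Word.ofBV (v + w))).setFlags (f0.setStatus (Alu.add v w).flags)).setRip 0x100004)) :
    InsnGoal L μ u Q (insn% [0x03, 0x44, 0x24, 0x04]) := by
  refine InsnGoal.of_body _ _ _ ?_
  u_body_ctx []
  exact hQ

/-! ### One `User.Step` from the code of a function -/

-- error: 41 bytes (the image's function at 1000A0H)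
#code_bytes code_error
  "55534883ec084889fb89f5488dbf8c000000e8b2b9000089ab8c000000b8000000"
  "004883c4085b5dc3"

/-- `lea rdi, [rdi+0x8c]` at offset 11 of `error`, wherever `error` is linked. -/
example (base rdi : Word) (Q : State → Prop) (h : HasCode L u base code_error)
    (hrip : u.rip = base + UInt64.ofNat 11) (h_rdi : u.reg .rdi = rdi)
    (hQ : Q ((u.setReg .rdi (rdi + 0x8c)).setRip (base + 18))) :
    Step L μ u Q := by
  u_step_code h 11 hrip [h_rdi, hrip]
  exact hQ

/-! ### Twelve instructions in a row -/

/-- A straight-line sequence of instruction terms, each from the state the one before left. -/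
def Run (L : Layout) (μ : Microarch) : List (Sem Unit) → State → (State → Prop) → Prop
  | [], u, Q => Q u
  | s :: ss, u, Q => InsnGoal L μ u (fun u' => Run L μ ss u' Q) s

theorem Run.cons (L : Layout) (μ : Microarch) (s : Sem Unit) (ss : List (Sem Unit)) (u : State) (Q : State → Prop) :
    Run L μ (s :: ss) u Q = InsnGoal L μ u (fun u' => Run L μ ss u' Q) s := rfl

theorem Run.nil (L : Layout) (μ : Microarch) (u : State) (Q : State → Prop) : Run L μ [] u Q = Q u := rfl

/-- A slot of the frame `[rsp - 40, rsp)`. -/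
theorem slot {rsp : Word} (hstack : L.Has (rsp - 40) 40) (i k : Nat) (hik : i + k ≤ 40) (a : Word)
    (ha : a = rsp - 40 + UInt64.ofNat i) : L.Has a k := by
  rw [ha]
  exact hstack.sub i k hik

/-- A prologue, a spill and its reload, 32- and 64-bit arithmetic, a comparison, an epilogue. The final state: five
register writes (in register order), two stores, ONE flags layer, RIP. The reload of `[rbp-0x14]` reads back the value
spilled there; the reload of the saved RBP by LEAVE goes through the later store to another slot — the walker's
business (`Mem.readLE_writeLE_has`) — and is stated as it comes out. -/
example (Q : State → Prop) (rsp rbp rdi : Word) (fl : Flags)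
    (h_rsp : u.reg .rsp = rsp) (h_rbp : u.reg .rbp = rbp) (h_rdi : u.reg .rdi = rdi) (h_rip : u.rip = 0x100000)
    (h_fl : u.flags = fl) (hμ : μ.vendor = .intel) (hstack : L.Has (rsp - 40) 40)
    (hQ : Q
      (((((((u.setReg .rax ((Word.ofBV (BitVec.signExtend 64 (Word.part .w32 rdi + 1#32)) * 4) <<< 2)).setReg
        .rdx (Word.ofBV (BitVec.signExtend 64 (Word.part .w32 rdi + 1#32)) * 4)).setReg
        .rsp rsp).setReg
        .rbp (UInt64.ofNat (((u.mem.writeLE (rsp - 8) 8 rbp.toNat).writeLE (rsp - 28) 4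
          (Word.part .w32 rdi).toNat).readLE (rsp - 8) 8))).setMem
        ((u.mem.writeLE (rsp - 8) 8 rbp.toNat).writeLE (rsp - 28) 4 (Word.part .w32 rdi).toNat)).setFlags
        (fl.setStatus (Alu.sub (Word.part .w32
          ((Word.ofBV (BitVec.signExtend 64 (Word.part .w32 rdi + 1#32)) * 4) <<< 2)) 5#32).flags)).setRip
        0x100026)) :
    Run L μ
      [ insn% [0x55],                                             -- push rbp
        insn% [0x48, 0x89, 0xe5],                                 -- mov rbp, rsp
        insn% [0x48, 0x83, 0xec, 0x20],                           -- sub rsp, 0x20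
        insn% [0x89, 0x7d, 0xec],                                 -- mov [rbp-0x14], edi
        insn% [0x8b, 0x45, 0xec],                                 -- mov eax, [rbp-0x14]
        insn% [0x83, 0xc0, 0x01],                                 -- add eax, 1
        insn% [0x48, 0x98],                                       -- cdqe
        insn% [0x48, 0x8d, 0x14, 0x85, 0x00, 0x00, 0x00, 0x00],   -- lea rdx, [rax*4+0]
        insn% [0x48, 0x89, 0xd0],                                 -- mov rax, rdx
        insn% [0x48, 0xc1, 0xe0, 0x02],                           -- shl rax, 2
        insn% [0x83, 0xf8, 0x05],                                 -- cmp eax, 5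
        insn% [0xc9] ]                                            -- leave
      u Q := by
  rw [Run.cons]; u_insn [h_rsp, h_rbp, h_rdi, h_rip, h_fl, hμ]
  case side_has => exact slot hstack 32 8 (by decide) _ (by simp only [word_lit, Word.addrNorm, Word.addrNormSub])
  rw [Run.cons]; u_insn [h_rsp, h_rbp, h_rdi, h_rip, h_fl, hμ]
  rw [Run.cons]; u_insn [h_rsp, h_rbp, h_rdi, h_rip, h_fl, hμ]
  rw [Run.cons]; u_insn [h_rsp, h_rbp, h_rdi, h_rip, h_fl, hμ]
  case side_has => exact slot hstack 12 4 (by decide) _ (by simp only [word_lit, Word.addrNorm, Word.addrNormSub])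
  rw [Run.cons]; u_insn [h_rsp, h_rbp, h_rdi, h_rip, h_fl, hμ]
  case side_has => exact slot hstack 12 4 (by decide) _ (by simp only [word_lit, Word.addrNorm, Word.addrNormSub])
  rw [Run.cons]; u_insn [h_rsp, h_rbp, h_rdi, h_rip, h_fl, hμ]
  rw [Run.cons]; u_insn [h_rsp, h_rbp, h_rdi, h_rip, h_fl, hμ]
  rw [Run.cons]; u_insn [h_rsp, h_rbp, h_rdi, h_rip, h_fl, hμ]
  rw [Run.cons]; u_insn [h_rsp, h_rbp, h_rdi, h_rip, h_fl, hμ]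
  rw [Run.cons]; u_insn [h_rsp, h_rbp, h_rdi, h_rip, h_fl, hμ]
  rw [Run.cons]; u_insn [h_rsp, h_rbp, h_rdi, h_rip, h_fl, hμ]
  rw [Run.cons]; u_insn [h_rsp, h_rbp, h_rdi, h_rip, h_fl, hμ]
  case side_has => exact slot hstack 32 8 (by decide) _ (by simp only [word_lit, Word.addrNorm, Word.addrNormSub])
  rw [Run.nil]
  exact hQ

/-! ### The normal form by itself -/

/-- Writes in any order come out in THE order; an overwritten write disappears; a read sees the last write. -/
example (a b c x : Word) (f g : Flags) (μ' : Mem) :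
    ((((((u.setRip a).setReg .rbx b).setFlags f).setReg .rax c).setMem μ').setReg .rbx x).setFlags g
      = ((((u.setReg .rax c).setReg .rbx x).setMem μ').setFlags g).setRip a := by
  u_norm

example (b c : Word) : (((u.setReg .rbx b).setRip 5).setReg .rax c).reg .rbx = b := by
  u_norm

end X86.User.StepSeqTest
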